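-- pv_equiv track=rewrite | github.com/knowit/Dataplattform | services/ingestion/webHooks/googleSheets/test.py | find_valid_coloums
-- ===== SOURCE A (Python) =====
-- def is_valid_field(field):
--     if (field != '' and field is not None):
--         return True
--     return False
--
-- def find_valid_coloums(coloum_row):
--     first_indx = 0
--     last_indx = len(coloum_row) - 1
--     for i in range(0, len(coloum_row)):
--         if is_valid_field(coloum_row[i]):
--             first_indx = i
--             break
--
--     for i in range(0, len(coloum_row)):
--         j = len(coloum_row) - i - 1
--         if is_valid_field(coloum_row[j]):
--             last_indx = j
--             break
--
--     return first_indx, last_indx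
-- ===== SOURCE B (Python) =====
-- def find_valid_coloums(coloum_row):
--     valid = [i for i, f in enumerate(coloum_row) if f != '' and f is not None]
--     return (valid[0] if valid else 0,
--             valid[-1] if valid else len(coloum_row) - 1)
-- ===== Notes on version B (the rewrite author's own statement) =====
-- stated objective: simpler
-- what changed: Replaces A's two end-anchored early-break index scans by a single enumerate pass collecting all valid indices and taking its endpoints (with the same defaults).
import Mathlib
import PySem

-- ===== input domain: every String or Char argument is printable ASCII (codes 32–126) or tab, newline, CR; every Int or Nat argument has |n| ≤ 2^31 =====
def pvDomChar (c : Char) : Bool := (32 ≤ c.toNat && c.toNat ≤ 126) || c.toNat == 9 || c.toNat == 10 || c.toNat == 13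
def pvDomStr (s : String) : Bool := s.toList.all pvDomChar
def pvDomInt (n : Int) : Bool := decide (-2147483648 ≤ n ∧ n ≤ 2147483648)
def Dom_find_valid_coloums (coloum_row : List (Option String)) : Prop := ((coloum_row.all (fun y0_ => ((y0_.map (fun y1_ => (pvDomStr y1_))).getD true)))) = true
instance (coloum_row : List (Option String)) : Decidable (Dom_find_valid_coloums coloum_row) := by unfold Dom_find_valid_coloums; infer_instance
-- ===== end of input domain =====

-- B replaces A's two end-anchored early-break scans with one enumerate pass that
-- collects every valid index and takes its endpoints (objective: simpler).

-- ===== PORT A =====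
def is_valid_field (field : Option String) : Bool :=
  if field != some "" && field != none then true else false

-- first loop: 'for i in range(0, len): if is_valid_field(row[i]): first_indx = i; break'
-- (the forward index scan with break, walked structurally; first_indx stays 0 if no break)
def pvFirstLoop : List (Option String) → Int → Int
  | [], _ => 0
  | x :: rest, i => if is_valid_field x then i else pvFirstLoop rest (i + 1)

-- second loop: 'for i in range(0, len): j = len-i-1; if is_valid_field(row[j]): last_indx = j; break'
-- (the backward index scan with break = walking the reversed list with j counting down;
--  last_indx stays at its initial value dflt = len-1 if no break)
def pvLastLoop : List (Option String) → Int → Int → Int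
  | [], _, dflt => dflt
  | x :: rest, j, dflt => if is_valid_field x then j else pvLastLoop rest (j - 1) dflt

def find_valid_coloums (coloum_row : List (Option String)) : Int × Int :=
  let n : Int := coloum_row.length
  (pvFirstLoop coloum_row 0, pvLastLoop coloum_row.reverse (n - 1) (n - 1))

-- ===== PORT B =====
-- 'valid = [i for i, f in enumerate(coloum_row) if f != '' and f is not None]'
def pvValid (coloum_row : List (Option String)) : List Int :=
  (PySem.List.enumerate coloum_row 0).filterMap
    (fun p => if p.2 != some "" && p.2 != none then some p.1 else none)

def find_valid_coloums_alt (coloum_row : List (Option String)) : Int × Int :=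
  let valid := pvValid coloum_row
  (valid.head?.getD 0, valid.getLast?.getD ((coloum_row.length : Int) - 1))

-- ===== PRECONDITION & SPEC =====
def Spec_find_valid_coloums (coloum_row : List (Option String)) (out : Int × Int) : Prop := out = find_valid_coloums_alt coloum_row
instance (coloum_row : List (Option String)) (out : Int × Int) : Decidable (Spec_find_valid_coloums coloum_row out) := by unfold Spec_find_valid_coloums; infer_instance

-- ===== CLAIM (what is proved, stated in full; the proofs are below) =====
def Claim_equal_find_valid_coloums : Prop := ∀ (coloum_row : List (Option String)), Dom_find_valid_coloums coloum_row → Spec_find_valid_coloums coloum_row (find_valid_coloums coloum_row)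

-- ===== LEMMAS AND PROOFS =====

-- the valid-index list starting from an arbitrary index s
def pvV (xs : List (Option String)) (s : Int) : List Int :=
  (PySem.List.enumerate xs s).filterMap
    (fun p => if p.2 != some "" && p.2 != none then some p.1 else none)

theorem pvV_nil (s : Int) : pvV [] s = [] := rfl

theorem pvV_cons (x : Option String) (xs : List (Option String)) (s : Int) :
    pvV (x :: xs) s =
      (if is_valid_field x then [s] else []) ++ pvV xs (s + 1) := by
  simp only [pvV, PySem.List.enumerate_cons, List.filterMap_cons, is_valid_field]
  by_cases h : (x != some "" && x != none) = true <;> simp [h]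

theorem pvV_append (xs ys : List (Option String)) (s : Int) :
    pvV (xs ++ ys) s = pvV xs s ++ pvV ys (s + xs.length) := by
  simp [pvV, PySem.List.enumerate_append, List.filterMap_append]

theorem pvFirstLoop_eq (xs : List (Option String)) (s : Int) :
    pvFirstLoop xs s = (pvV xs s).head?.getD 0 := by
  induction xs generalizing s with
  | nil => simp [pvFirstLoop, pvV_nil]
  | cons x xs ih =>
    rw [pvFirstLoop, pvV_cons]
    by_cases h : is_valid_field x = true <;> simp [h, ih]

theorem pvLastLoop_eq (xs : List (Option String)) (s d : Int) :
    pvLastLoop xs.reverse (s + xs.length - 1) d = (pvV xs s).getLast?.getD d := by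
  induction xs using List.reverseRecOn generalizing s with
  | nil => simp [pvLastLoop, pvV_nil]
  | append_singleton ys x ih =>
    rw [pvV_append, pvV_cons, pvV_nil]
    have hrev : (ys ++ [x]).reverse = x :: ys.reverse := by simp
    have hidx : s + ((ys ++ [x]).length : Int) - 1 = s + (ys.length : Int) := by
      simp; omega
    rw [hrev, hidx, pvLastLoop]
    by_cases h : is_valid_field x = true
    · simp [h]
    · simp only [h, Bool.false_eq_true, if_false, List.append_nil]
      rw [← ih s]

-- ===== VERDICT (by name: the statement is the Claim_ definition above) =====
theorem find_valid_coloums_spec : Claim_equal_find_valid_coloums := by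
  intro xs _
  unfold Spec_find_valid_coloums find_valid_coloums find_valid_coloums_alt
  have h1 := pvFirstLoop_eq xs 0
  have h2 := pvLastLoop_eq xs 0 ((xs.length : Int) - 1)
  have : pvValid xs = pvV xs 0 := rfl
  simp only [this, zero_add] at *
  rw [h1, ← h2]
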